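-- pv_equiv track=rewrite | github.com/YeWenguang/TraceAlign | utils/trim_long_docstrings.py | trim_long_docstrings
-- ===== SOURCE A (Python) =====
-- def trim_long_docstrings(code_content: str, max_lines: int = 4) -> str:
--     """Auto-translated documentation for trim_long_docstrings."""
--     lines = code_content.splitlines()
--     new_lines = []
--
--     lines_iterator = iter(lines)
--
--     for line in lines_iterator:
--         new_lines.append(line)
--
--         stripped_line = line.strip()
--         if stripped_line.startswith('def '):
--
--             try:
--                 docstring_first_line = next(lines_iterator)
--                 stripped_doc_line = docstring_first_line.strip()
--
--                 quote_type = None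
--                 if stripped_doc_line.startswith('"""'):
--                     quote_type = '"""'
--                 elif stripped_doc_line.startswith("'''"):
--                     quote_type = "'''"
--
--                 if quote_type:
--                     docstring_lines = [docstring_first_line]
--                     is_single_line_docstring = (
--                         stripped_doc_line.endswith(quote_type) and len(stripped_doc_line) > len(quote_type)
--                     )
--
--                     if not is_single_line_docstring:
--                         while True:
--                             next_doc_line = next(lines_iterator)
--                             docstring_lines.append(next_doc_line)
--                             if next_doc_line.strip().endswith(quote_type):
--                                 break
--
--                     full_docstring_text = "\n".join(docstring_lines)
--                     content = full_docstring_text.strip()[len(quote_type):-len(quote_type)].strip()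
--                     content_line_count = len(content.splitlines())
--
--                     if content_line_count > max_lines:
--                         indentation = docstring_first_line[:len(docstring_first_line) - len(docstring_first_line.lstrip())]
--
--                         trimmed_content_lines = content.splitlines()[:max_lines]
--
--                         new_docstring = [f"{indentation}{quote_type}"]
--                         new_docstring.extend([f"{indentation}{content_line}" for content_line in trimmed_content_lines])
--                         new_docstring.append(f"{indentation}{quote_type}")
--
--                         new_lines.extend(new_docstring)
--                     else:
--                         new_lines.extend(docstring_lines)
--                 else:
--                     new_lines.append(docstring_first_line)
--
--             except StopIteration:
--                 break
--
--     return "\n".join(new_lines)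
-- ===== SOURCE B (Python) =====
-- def trim_long_docstrings(code_content: str, max_lines: int = 4) -> str:
--     """State-machine re-implementation: one flat pass over the lines builds a list of
--     tagged blocks (plain line / docstring block), a second pass renders the blocks."""
--     CODE, AFTER_DEF, IN_DOC = 0, 1, 2
--     state = CODE
--     quote = first = None
--     acc = []
--     blocks = []  # ('line', s) or ('doc', doc_lines, first_line, quote)
--     for line in code_content.splitlines():
--         if state == CODE:
--             blocks.append(('line', line))
--             if line.strip().startswith('def '):
--                 state = AFTER_DEF
--         elif state == AFTER_DEF:
--             s = line.strip()
--             q = '"""' if s.startswith('"""') else ("'''" if s.startswith("'''") else None)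
--             if q is None:
--                 blocks.append(('line', line))
--                 state = CODE
--             elif s.endswith(q) and len(s) > len(q):
--                 blocks.append(('doc', [line], line, q))
--                 state = CODE
--             else:
--                 quote, first, acc, state = q, line, [line], IN_DOC
--         else:  # IN_DOC
--             acc = acc + [line]
--             if line.strip().endswith(quote):
--                 blocks.append(('doc', acc, first, quote))
--                 state = CODE
--     # a pending AFTER_DEF/IN_DOC state at end of input is simply dropped
--     out = []
--     for b in blocks:
--         if b[0] == 'line':
--             out.append(b[1])
--         else:
--             out.extend(_render_doc(b[1], b[2], b[3], max_lines))
--     return "\n".join(out)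
--
--
-- def _render_doc(doc_lines, first, quote, max_lines):
--     content = "\n".join(doc_lines).strip()[len(quote):-len(quote)].strip()
--     content_lines = content.splitlines()
--     if len(content_lines) <= max_lines:
--         return doc_lines
--     indent = first[:len(first) - len(first.lstrip())]
--     return [indent + quote] + [indent + c for c in content_lines[:max_lines]] + [indent + quote]
-- ===== Notes on version B (the rewrite author's own statement) =====
-- stated objective: alternative
-- what changed: Replaces A's nested-loop shared-iterator design (next() calls and an inner while loop consuming the iterator inside the for body) with a flat one-line-at-a-time state machine (states CODE/AFTER_DEF/IN_DOC) that produces an intermediate list of tagged blocks, which a separate second pass then renders; no line is consumed out of band and docstring trimming is isolated in the render stage.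
import Mathlib
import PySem

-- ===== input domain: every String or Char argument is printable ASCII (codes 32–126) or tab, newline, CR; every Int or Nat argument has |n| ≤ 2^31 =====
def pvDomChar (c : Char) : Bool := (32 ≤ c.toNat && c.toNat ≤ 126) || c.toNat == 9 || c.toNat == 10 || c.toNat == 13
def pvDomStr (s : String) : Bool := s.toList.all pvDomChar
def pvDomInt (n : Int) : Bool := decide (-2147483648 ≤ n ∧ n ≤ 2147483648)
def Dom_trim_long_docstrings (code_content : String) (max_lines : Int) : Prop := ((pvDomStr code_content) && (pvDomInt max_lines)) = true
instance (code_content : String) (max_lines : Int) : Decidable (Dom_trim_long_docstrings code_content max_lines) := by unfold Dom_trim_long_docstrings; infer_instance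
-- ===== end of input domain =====

-- B: flat one-line-at-a-time state machine producing tagged blocks, rendered by a separate second pass,
-- instead of A's nested loops over a shared iterator; same return value, no speed claim.
-- (A's loop port carries a Nat fuel argument, initialised to the line count, only to make the recursion
-- structural; with that fuel the fuel-exhausted arm is never taken, so the port computes exactly what A computes.)

-- ===== PORT A =====
-- the inner `while True: next_doc_line = next(lines_iterator) …` loop of A: collects lines
-- until one strip().endswith(q); none = StopIteration (iterator exhausted)
def pvScanA (q : String) : List String → List String → Option (List String × List String)
  | [], _ => none
  | x :: xs, coll =>
    let coll := coll ++ [x]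
    if PySem.Str.endswith (PySem.Str.strip x) q then some (coll, xs)
    else pvScanA q xs coll

-- A's docstring-emission block (full_docstring_text … down to new_lines.extend)
def pvEmitA (max_lines : Int) (q d : String) (ds : List String) : List String :=
  let full := PySem.Str.join "\n" ds
  let content := PySem.Str.strip (PySem.Str.slice (PySem.Str.strip full)
      (some (PySem.Str.len q : Int)) (some (-(PySem.Str.len q : Int))))
  let cnt := (PySem.Str.splitlines content).length
  if (cnt : Int) > max_lines then
    let ind := PySem.Str.slice d none
        (some ((PySem.Str.len d : Int) - (PySem.Str.len (PySem.Str.lstrip d) : Int)))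
    [ind ++ q] ++ (PySem.List.slice (PySem.Str.splitlines content) none (some max_lines)).map
        (fun c => ind ++ c) ++ [ind ++ q]
  else ds

-- A's `for line in lines_iterator` loop; the list argument is the rest of the iterator
def pvLoopA (max_lines : Int) : Nat → List String → List String → List String
  | 0, _, acc => acc
  | _ + 1, [], acc => acc
  | fuel + 1, line :: rest, acc =>
    let acc := acc ++ [line]
    if PySem.Str.startswith (PySem.Str.strip line) "def " then
      match rest with
      | [] => acc    -- StopIteration at `next(lines_iterator)` → break
      | d :: rest2 =>
        let sd := PySem.Str.strip d
        let qt : Option String :=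
          if PySem.Str.startswith sd "\"\"\"" then some "\"\"\""
          else if PySem.Str.startswith sd "'''" then some "'''"
          else none
        match qt with
        | none => pvLoopA max_lines fuel rest2 (acc ++ [d])
        | some q =>
          if PySem.Str.endswith sd q && decide ((PySem.Str.len sd : Int) > (PySem.Str.len q : Int)) then
            pvLoopA max_lines fuel rest2 (acc ++ pvEmitA max_lines q d [d])
          else
            match pvScanA q rest2 [d] with
            | none => acc    -- StopIteration inside the while loop → break
            | some (ds, rest3) => pvLoopA max_lines fuel rest3 (acc ++ pvEmitA max_lines q d ds)
    else pvLoopA max_lines fuel rest acc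

def trim_long_docstrings (code_content : String) (max_lines : Int) : String :=
  PySem.Str.join "\n"
    (pvLoopA max_lines (PySem.Str.splitlines code_content).length (PySem.Str.splitlines code_content) [])

-- ===== PORT B =====
-- the state of B's machine (CODE / AFTER_DEF / IN_DOC with quote, first line, accumulated lines)
inductive PvSt
  | code
  | afterDef
  | inDoc (q first : String) (acc : List String)
deriving DecidableEq

-- a tagged block: plain line, or a docstring block (doc_lines, first_line, quote)
inductive PvBlock
  | line (s : String)
  | doc (ds : List String) (first q : String)
deriving DecidableEq

-- one iteration of B's `for line in code_content.splitlines()` loop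
def pvStep (p : PvSt × List PvBlock) (line : String) : PvSt × List PvBlock :=
  match p.1 with
  | .code =>
      (if PySem.Str.startswith (PySem.Str.strip line) "def " then .afterDef else .code,
       p.2 ++ [.line line])
  | .afterDef =>
      let s := PySem.Str.strip line
      let q : Option String :=
        if PySem.Str.startswith s "\"\"\"" then some "\"\"\""
        else if PySem.Str.startswith s "'''" then some "'''"
        else none
      match q with
      | none => (.code, p.2 ++ [.line line])
      | some q =>
        if PySem.Str.endswith s q && decide ((PySem.Str.len s : Int) > (PySem.Str.len q : Int)) then
          (.code, p.2 ++ [.doc [line] line q])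
        else (.inDoc q line [line], p.2)
  | .inDoc q first acc =>
      let acc := acc ++ [line]
      if PySem.Str.endswith (PySem.Str.strip line) q then (.code, p.2 ++ [.doc acc first q])
      else (.inDoc q first acc, p.2)

-- _render_doc
def pvRenderDoc (doc_lines : List String) (first q : String) (max_lines : Int) : List String :=
  let content := PySem.Str.strip (PySem.Str.slice (PySem.Str.strip (PySem.Str.join "\n" doc_lines))
      (some (PySem.Str.len q : Int)) (some (-(PySem.Str.len q : Int))))
  let content_lines := PySem.Str.splitlines content
  if (content_lines.length : Int) ≤ max_lines then doc_lines
  else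
    let ind := PySem.Str.slice first none
        (some ((PySem.Str.len first : Int) - (PySem.Str.len (PySem.Str.lstrip first) : Int)))
    [ind ++ q] ++ (PySem.List.slice content_lines none (some max_lines)).map (fun c => ind ++ c)
      ++ [ind ++ q]

-- B's second loop: render each block
def pvRenderBlock (max_lines : Int) : PvBlock → List String
  | .line s => [s]
  | .doc ds first q => pvRenderDoc ds first q max_lines

def trim_long_docstrings_alt (code_content : String) (max_lines : Int) : String :=
  PySem.Str.join "\n"
    ((((PySem.Str.splitlines code_content).foldl pvStep (PvSt.code, [])).2).foldl
      (fun out b => out ++ pvRenderBlock max_lines b) [])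

-- ===== PRECONDITION & SPEC =====
def Spec_trim_long_docstrings (code_content : String) (max_lines : Int) (out : String) : Prop := out = trim_long_docstrings_alt code_content max_lines
instance (code_content : String) (max_lines : Int) (out : String) : Decidable (Spec_trim_long_docstrings code_content max_lines out) := by unfold Spec_trim_long_docstrings; infer_instance

-- ===== CLAIM (what is proved, stated in full; the proofs are below) =====
def Claim_equal_trim_long_docstrings : Prop := ∀ (code_content : String) (max_lines : Int), Dom_trim_long_docstrings code_content max_lines → Spec_trim_long_docstrings code_content max_lines (trim_long_docstrings code_content max_lines)

-- ===== LEMMAS AND PROOFS =====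

theorem render_foldl (m : Int) (bs : List PvBlock) :
    ∀ out, bs.foldl (fun out b => out ++ pvRenderBlock m b) out
      = out ++ bs.flatMap (pvRenderBlock m) := by
  induction bs with
  | nil => intro out; simp
  | cons b bs ih => intro out; simp [List.foldl_cons, ih]

theorem pvRenderDoc_eq_emit (ds : List String) (d q : String) (m : Int) :
    pvRenderDoc ds d q m = pvEmitA m q d ds := by
  simp only [pvRenderDoc, pvEmitA]
  split_ifs with h1 h2 <;> first | rfl | omega

-- pvStep never reads the blocks accumulator: it can be pulled out of the fold
theorem pvStep_blocks_out :
    ∀ (l : List String) (st : PvSt) (bs : List PvBlock),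
      l.foldl pvStep (st, bs)
        = ((l.foldl pvStep (st, [])).1, bs ++ (l.foldl pvStep (st, [])).2) := by
  intro l
  induction l with
  | nil => intro st bs; simp
  | cons x xs ih =>
      intro st bs
      have hstep : ∀ bs', pvStep (st, bs') x
          = ((pvStep (st, ([] : List PvBlock)) x).1, bs' ++ (pvStep (st, ([] : List PvBlock)) x).2) := by
        intro bs'
        cases st with
        | code => simp only [pvStep]; split <;> simp
        | afterDef =>
            simp only [pvStep]
            split
            · simp
            · split <;> simp
        | inDoc q first acc => simp only [pvStep]; split <;> simp
      rw [List.foldl_cons, List.foldl_cons, hstep bs, hstep []]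
      simp only [List.nil_append]
      rw [ih ((pvStep (st, ([] : List PvBlock)) x).1) (bs ++ (pvStep (st, ([] : List PvBlock)) x).2),
          ih ((pvStep (st, ([] : List PvBlock)) x).1) ((pvStep (st, ([] : List PvBlock)) x).2)]
      simp [List.append_assoc]

theorem pvLoopA_acc (m : Int) :
    ∀ f l acc, pvLoopA m f l acc = acc ++ pvLoopA m f l [] := by
  intro f
  induction f with
  | zero => intro l acc; simp [pvLoopA]
  | succ f ih =>
      intro l acc
      cases l with
      | nil => simp [pvLoopA]
      | cons line rest =>
          simp only [pvLoopA]
          split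
          · cases rest with
            | nil => simp
            | cons d rest2 =>
                simp only []
                split
                · rw [ih rest2 (acc ++ [line] ++ [d]), ih rest2 ([] ++ [line] ++ [d])]
                  simp
                · rename_i q heq
                  split
                  · rw [ih rest2 (acc ++ [line] ++ pvEmitA m q d [d]),
                        ih rest2 ([] ++ [line] ++ pvEmitA m q d [d])]
                    simp
                  · split
                    · simp
                    · rename_i ds rest3 hsc
                      rw [ih rest3 (acc ++ [line] ++ pvEmitA m q d ds),
                          ih rest3 ([] ++ [line] ++ pvEmitA m q d ds)]
                      simp
          · rw [ih rest (acc ++ [line]), ih rest ([] ++ [line])]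
            simp

-- B's IN_DOC run over the remaining lines is exactly A's inner scan
theorem foldl_inDoc_eq_scan (q first : String) :
    ∀ (l coll : List String),
      l.foldl pvStep (PvSt.inDoc q first coll, []) =
        match pvScanA q l coll with
        | none => (PvSt.inDoc q first (coll ++ l), [])
        | some (ds, rest) =>
            ((rest.foldl pvStep (PvSt.code, [])).1,
             [PvBlock.doc ds first q] ++ (rest.foldl pvStep (PvSt.code, [])).2) := by
  intro l
  induction l with
  | nil => intro coll; simp [pvScanA]
  | cons x xs ih =>
      intro coll
      rw [List.foldl_cons]
      simp only [pvStep, pvScanA]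
      by_cases hq : PySem.Str.endswith (PySem.Str.strip x) q = true
      · rw [if_pos hq, if_pos hq]
        simp only [List.nil_append]
        rw [pvStep_blocks_out xs PvSt.code [PvBlock.doc (coll ++ [x]) first q]]
      · rw [if_neg hq, if_neg hq]
        rw [ih (coll ++ [x])]
        cases pvScanA q xs (coll ++ [x]) with
        | none => simp
        | some p => rfl

theorem pvScanA_len {q : String} :
    ∀ {l coll ds rest}, pvScanA q l coll = some (ds, rest) → rest.length < l.length := by
  intro l
  induction l with
  | nil => intro coll ds rest h; cases h
  | cons x xs ih =>
      intro coll ds rest h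
      simp only [pvScanA] at h
      split at h
      · cases h; simp
      · have := ih h; simp; omega

-- main bridge: A's loop from the top of the remaining lines equals B's fold from state CODE, rendered
theorem pvLoop_eq_fold (m : Int) :
    ∀ f l, l.length ≤ f →
      pvLoopA m f l [] = ((l.foldl pvStep (PvSt.code, [])).2).flatMap (pvRenderBlock m) := by
  intro f
  induction f with
  | zero =>
      intro l hl
      have : l = [] := List.eq_nil_of_length_eq_zero (by omega)
      subst this; simp [pvLoopA]
  | succ f ih =>
      intro l hl
      cases l with
      | nil => simp [pvLoopA]
      | cons line rest =>
          simp only [pvLoopA, List.foldl_cons, List.nil_append]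
          by_cases hdef : PySem.Str.startswith (PySem.Str.strip line) "def " = true
          · rw [if_pos hdef]
            simp only [pvStep, if_pos hdef]
            cases rest with
            | nil => simp [pvRenderBlock]
            | cons d rest2 =>
                rw [List.foldl_cons]
                simp only [pvStep]
                cases hqt : (if PySem.Str.startswith (PySem.Str.strip d) "\"\"\"" then some ("\"\"\"" : String)
                    else if PySem.Str.startswith (PySem.Str.strip d) "'''" then some ("'''" : String)
                    else none) with
                | none =>
                    simp only [List.nil_append]
                    rw [pvLoopA_acc m f rest2, ih rest2 (by simp at hl ⊢; omega)]
                    rw [pvStep_blocks_out rest2 PvSt.code ([PvBlock.line line] ++ [PvBlock.line d])]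
                    simp [pvRenderBlock]
                | some q =>
                    simp only []
                    by_cases hsg : (PySem.Str.endswith (PySem.Str.strip d) q &&
                        decide ((PySem.Str.len (PySem.Str.strip d) : Int) > (PySem.Str.len q : Int))) = true
                    · rw [if_pos hsg, if_pos hsg]
                      simp only [List.nil_append]
                      rw [pvLoopA_acc m f rest2, ih rest2 (by simp at hl ⊢; omega)]
                      rw [pvStep_blocks_out rest2 PvSt.code ([PvBlock.line line] ++ [PvBlock.doc [d] d q])]
                      simp [pvRenderBlock, pvRenderDoc_eq_emit]
                    · rw [if_neg hsg, if_neg hsg]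
                      simp only [List.nil_append]
                      rw [pvStep_blocks_out rest2 (PvSt.inDoc q d [d]) [PvBlock.line line]]
                      rw [foldl_inDoc_eq_scan q d rest2 [d]]
                      cases hsc : pvScanA q rest2 [d] with
                      | none => simp [pvRenderBlock]
                      | some p =>
                          obtain ⟨ds, rest3⟩ := p
                          simp only []
                          have hlen : rest3.length < rest2.length := pvScanA_len hsc
                          rw [pvLoopA_acc m f rest3, ih rest3 (by simp at hl ⊢; omega)]
                          simp [pvRenderBlock, pvRenderDoc_eq_emit]
          · rw [if_neg hdef]
            simp only [pvStep, if_neg hdef, List.nil_append]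
            rw [pvLoopA_acc m f rest, ih rest (by simp at hl; omega)]
            rw [pvStep_blocks_out rest PvSt.code [PvBlock.line line]]
            simp [pvRenderBlock]

-- ===== VERDICT (by name: the statement is the Claim_ definition above) =====
theorem trim_long_docstrings_spec : Claim_equal_trim_long_docstrings := by
  intro c m _
  unfold Spec_trim_long_docstrings trim_long_docstrings trim_long_docstrings_alt
  rw [render_foldl, List.nil_append, pvLoop_eq_fold m (PySem.Str.splitlines c).length _ le_rfl]
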